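-- pv_equiv track=rewrite | github.com/Jusang98/Jungle-Baekjoon | 프로그래머스/unrated/140108. 문자열 나누기/문자열 나누기.py | solution
-- ===== SOURCE A (Python) =====
-- def solution(s):
--     count1 = 0
--     count2 = 0
--     answer = 0
--     x = ""
--     for i in s:
--         if count1 == count2:
--             count1 +=1
--             x = i
--             answer +=1
--         elif i == x:
--             count1 +=1
--         else:
--             count2 +=1
--     return answer
-- ===== SOURCE B (Python) =====
-- def solution(s):
--     # Divide-and-count: repeatedly split off the shortest balanced prefix,
--     # found by testing candidate prefix lengths with slicing + list.count,
--     # and continue on the remainder.  No streaming counters are threaded.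
--     t = list(s)
--     answer = 0
--     while t:
--         answer += 1
--         x = t[0]
--         cut = len(t)  # default: the unbalanced trailing remainder takes all
--         for k in range(2, len(t) + 1):
--             if 2 * t[:k].count(x) == k:
--                 cut = k
--                 break
--         t = t[cut:]
--     return answer
-- ===== Notes on version B (the rewrite author's own statement) =====
-- stated objective: alternative
-- what changed: Replaced A's single left-to-right pass threading four mutable variables (two running counters, answer, current marker) by a recursive divide-and-count: repeatedly split off the shortest balanced prefix, found by testing candidate prefix lengths k with 2*t[:k].count(x)==k via slicing and list.count, and recurse on the remainder; no streaming counters are kept.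
import Mathlib
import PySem

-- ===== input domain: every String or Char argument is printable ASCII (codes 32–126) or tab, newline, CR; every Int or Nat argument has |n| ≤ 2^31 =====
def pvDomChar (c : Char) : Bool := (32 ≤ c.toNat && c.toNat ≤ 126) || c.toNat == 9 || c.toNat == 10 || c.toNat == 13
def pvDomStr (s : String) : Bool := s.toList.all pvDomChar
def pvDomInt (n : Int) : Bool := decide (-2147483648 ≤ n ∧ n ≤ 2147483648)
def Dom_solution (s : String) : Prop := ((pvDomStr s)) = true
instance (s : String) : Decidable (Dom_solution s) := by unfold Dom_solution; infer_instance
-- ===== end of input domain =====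

-- B replaces A's single left-to-right pass threading four mutable variables by a
-- recursive divide-and-count that splits off the shortest balanced prefix, found by
-- testing prefix lengths with slicing + list.count. Objective: alternative decomposition.

-- ===== PORT A =====
-- state: (count1, count2, answer, x); x is a String ("" initially, a one-char
-- string after a reset), exactly as in the Python.
def solutionStep (st : Int × Int × Int × String) (i : Char) : Int × Int × Int × String :=
  let (c1, c2, ans, x) := st
  if c1 == c2 then (c1 + 1, c2, ans + 1, String.ofList [i])
  else if String.ofList [i] == x then (c1 + 1, c2, ans, x)
  else (c1, c2 + 1, ans, x)

def solution (s : String) : Int :=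
  (s.toList.foldl solutionStep (0, 0, 0, "")).2.2.1

-- ===== PORT B =====
-- the early-return 'for k in range(...)' loop of Source B: first k satisfying p
def findFirst (p : Int → Bool) : List Int → Option Int
  | [] => none
  | k :: rest => if p k then some k else findFirst p rest

-- the while-loop of Source B as a tail recursion on the remaining list; the Nat fuel
-- (called with the list's length, and each step strictly shortens the list) only
-- makes the recursion structural
def bcountF : Nat → List Char → Int
  | _, [] => 0
  | 0, _ :: _ => 1
  | fuel + 1, x :: rest =>
    match findFirst
        (fun k => 2 * ((PySem.List.count (PySem.List.slice (x :: rest) none (some k)) x : Int)) == k)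
        (PySem.List.pyRange 2 (((x :: rest).length : Int) + 1) 1) with
    | some k => 1 + bcountF fuel (PySem.List.slice (x :: rest) (some k) none)
    | none => 1 + bcountF fuel (PySem.List.slice (x :: rest) (some ((x :: rest).length : Int)) none)

def bcount (t : List Char) : Int := bcountF t.length t

def solution_alt (s : String) : Int := bcount s.toList

-- ===== PRECONDITION & SPEC =====
def Spec_solution (s : String) (out : Int) : Prop := out = solution_alt s
instance (s : String) (out : Int) : Decidable (Spec_solution s out) := by unfold Spec_solution; infer_instance

-- ===== CLAIM (what is proved, stated in full; the proofs are below) =====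
def Claim_equal_solution : Prop := ∀ (s : String), Dom_solution s → Spec_solution s (solution s)

-- ===== LEMMAS AND PROOFS =====

-- proof-side segment machinery: altInner consumes one balanced segment,
-- altOuter counts segments (intermediate between A's fold and B's recursion)
def altInner (x : Char) (c1 c2 : Int) : List Char → List Char
  | [] => []
  | ch :: rest =>
    let c1' := if ch == x then c1 + 1 else c1
    let c2' := if ch == x then c2 else c2 + 1
    if c1' == c2' then rest else altInner x c1' c2' rest

theorem altInner_length (x : Char) (l : List Char) : ∀ c1 c2,
    (altInner x c1 c2 l).length ≤ l.length := by
  induction l with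
  | nil => intro c1 c2; simp [altInner]
  | cons ch rest ih =>
    intro c1 c2
    simp only [altInner]
    split <;> split
    · simp
    · exact le_trans (ih _ _) (Nat.le_succ _)
    · simp
    · exact le_trans (ih _ _) (Nat.le_succ _)

def altOuter : List Char → Int
  | [] => 0
  | ch :: rest => 1 + altOuter (altInner ch 0 0 (ch :: rest))
termination_by l => l.length
decreasing_by
  simp only [altInner, beq_self_eq_true, if_true]
  split
  · simp
  · exact Nat.lt_succ_of_le (altInner_length ch rest _ _)

theorem mkstr_beq (a b : Char) : (String.ofList [a] == String.ofList [b]) = (a == b) := by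
  by_cases h : a = b
  · simp [h]
  · have hne : String.ofList [a] ≠ String.ofList [b] := by
      intro hc
      have := congrArg String.toList hc
      simp at this
      exact h this
    simp [hne, h]

-- altInner depends on the two counters only through their difference.
theorem altInner_shift (x : Char) (l : List Char) : ∀ c1 c2 d : Int,
    altInner x (c1 + d) (c2 + d) l = altInner x c1 c2 l := by
  induction l with
  | nil => intro _ _ _; simp [altInner]
  | cons ch rest ih =>
    intro c1 c2 d
    simp only [altInner]
    by_cases h : (ch == x) = true
    · simp only [h, if_true]
      have e : c1 + d + 1 = c1 + 1 + d := by ring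
      rw [e]
      by_cases he : c1 + 1 = c2
      · simp [he]
      · have h1 : ¬ (c1 + 1 + d = c2 + d) := by omega
        simp only [beq_iff_eq, he, h1, if_false]
        exact ih _ _ _
    · have h' : (ch == x) = false := by simpa using h
      simp only [h', Bool.false_eq_true, if_false]
      have e : c2 + d + 1 = c2 + 1 + d := by ring
      rw [e]
      by_cases he : c1 = c2 + 1
      · simp [he]
      · have h1 : ¬ (c1 + d = c2 + 1 + d) := by omega
        simp only [beq_iff_eq, he, h1, if_false]
        exact ih _ _ _

-- joint invariant, by strong induction on the list length:
-- P1: from a balanced state, A's fold adds altOuter l to the answer;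
-- P2: from an unbalanced state with marker x0, A's fold adds altOuter of the
--     suffix left after the current segment finishes.
theorem main_inv : ∀ (n : ℕ) (l : List Char), l.length ≤ n →
    (∀ (c ans : Int) (x : String),
      (List.foldl solutionStep (c, c, ans, x) l).2.2.1 = ans + altOuter l) ∧
    (∀ (c1 c2 ans : Int) (x0 : Char), c1 ≠ c2 →
      (List.foldl solutionStep (c1, c2, ans, String.ofList [x0]) l).2.2.1
        = ans + altOuter (altInner x0 c1 c2 l)) := by
  intro n
  induction n with
  | zero =>
    intro l hl
    have : l = [] := List.eq_nil_of_length_eq_zero (Nat.le_zero.mp hl)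
    subst this
    exact ⟨by intro c ans x; simp [altOuter], by intro c1 c2 ans x0 _; simp [altInner, altOuter]⟩
  | succ n ih =>
    intro l hl
    cases l with
    | nil =>
      exact ⟨by intro c ans x; simp [altOuter], by intro c1 c2 ans x0 _; simp [altInner, altOuter]⟩
    | cons ch rest =>
      have hr : rest.length ≤ n := by simpa using Nat.succ_le_succ_iff.mp hl
      constructor
      · -- balanced start: a reset happens at ch
        intro c ans x
        simp only [List.foldl, solutionStep, beq_self_eq_true, if_true]
        have hstep : (List.foldl solutionStep (c + 1, c, ans + 1, String.ofList [ch]) rest).2.2.1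
            = (ans + 1) + altOuter (altInner ch (c + 1) c rest) :=
          (ih rest hr).2 (c + 1) c (ans + 1) ch (by omega)
        have hshift : altInner ch (c + 1) c rest = altInner ch 1 0 rest := by
          have := altInner_shift ch rest 1 0 c
          simpa [add_comm] using this
        have houter : altOuter (ch :: rest) = 1 + altOuter (altInner ch 1 0 rest) := by
          simp only [altOuter, altInner, beq_self_eq_true, if_true]
          norm_num
        rw [hstep, hshift, houter]; ring
      · -- mid-segment: the elif/else branch of A matches one step of altInner
        intro c1 c2 ans x0 hne
        have hcc : ((c1 : Int) == c2) = false := by simpa using hne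
        simp only [List.foldl, solutionStep, hcc, Bool.false_eq_true, if_false, mkstr_beq]
        by_cases hch : (ch == x0) = true
        · simp only [hch, if_true, altInner]
          by_cases hb : c1 + 1 = c2
          · simp only [beq_iff_eq, hb, if_true]
            exact (ih rest hr).1 c2 ans (String.ofList [x0])
          · simp only [beq_iff_eq, hb, if_false]
            exact (ih rest hr).2 (c1 + 1) c2 ans x0 hb
        · have hch' : (ch == x0) = false := by simpa using hch
          simp only [hch', Bool.false_eq_true, if_false, altInner]
          by_cases hb : c1 = c2 + 1
          · simp only [beq_iff_eq, hb, if_true]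
            exact (ih rest hr).1 (c2 + 1) ans (String.ofList [x0])
          · simp only [beq_iff_eq, hb, if_false]
            exact (ih rest hr).2 c1 (c2 + 1) ans x0 hb

-- first 1-based index j at which the running ±1 walk (start d, +1 on a match
-- with x, -1 otherwise) hits 0; none if it never does
def firstZero (x : Char) (d : Int) : List Char → Option Nat
  | [] => none
  | ch :: rest =>
    let d' := d + (if ch == x then 1 else -1)
    if d' = 0 then some 1 else (firstZero x d' rest).map (· + 1)

-- altInner consumes exactly the prefix up to the first zero of the walk
theorem altInner_eq_firstZero (x : Char) : ∀ (l : List Char) (c1 c2 : Int),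
    altInner x c1 c2 l =
      (match firstZero x (c1 - c2) l with
       | some j => l.drop j
       | none => []) := by
  intro l
  induction l with
  | nil => intro c1 c2; simp [altInner, firstZero]
  | cons ch rest ih =>
    intro c1 c2
    simp only [altInner, firstZero]
    by_cases h : (ch == x) = true
    · simp only [h, if_true]
      by_cases hz : c1 + 1 = c2
      · simp [hz, show c1 - c2 + 1 = 0 by omega]
      · have hz' : ¬ (c1 - c2 + 1 = 0) := by omega
        simp only [beq_iff_eq, hz, if_false, hz']
        rw [ih (c1 + 1) c2]
        have e : c1 + 1 - c2 = c1 - c2 + 1 := by ring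
        rw [e]
        cases firstZero x (c1 - c2 + 1) rest <;> simp
    · have h' : (ch == x) = false := by simpa using h
      simp only [h', Bool.false_eq_true, if_false]
      by_cases hz : c1 = c2 + 1
      · simp [hz]
      · have hz' : ¬ (c1 - c2 + -1 = 0) := by omega
        simp only [beq_iff_eq, hz, if_false, hz']
        rw [ih c1 (c2 + 1)]
        have e : c1 - (c2 + 1) = c1 - c2 + -1 := by ring
        rw [e]
        cases firstZero x (c1 - c2 + -1) rest <;> simp

-- walk value after i steps, expressed by prefix counts
theorem count_take_succ (x ch : Char) (rest : List Char) (i : Nat) :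
    (((ch :: rest).take (i + 1)).count x : Int)
      = ((rest.take i).count x : Int) + (if ch == x then 1 else 0) := by
  simp only [List.take_succ_cons, List.count_cons]
  by_cases h : ch = x
  · simp [h]
  · have h2 : (x == ch) = false := by simp [Ne.symm h]
    have h3 : (ch == x) = false := by simp [h]
    simp [h3]

-- characterisation of firstZero = some j: j hits zero first
theorem firstZero_some (x : Char) : ∀ (l : List Char) (d : Int) (j : Nat),
    firstZero x d l = some j →
      1 ≤ j ∧ j ≤ l.length ∧ d + 2 * ((l.take j).count x : Int) - j = 0 ∧
      ∀ i : Nat, 1 ≤ i → i < j → d + 2 * ((l.take i).count x : Int) - i ≠ 0 := by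
  intro l
  induction l with
  | nil => intro d j h; simp [firstZero] at h
  | cons ch rest ih =>
    intro d j h
    simp only [firstZero] at h
    by_cases hz : d + (if ch == x then 1 else -1) = 0
    · simp only [hz, if_true, Option.some.injEq] at h
      subst h
      refine ⟨le_rfl, by simp, ?_, by omega⟩
      have := count_take_succ x ch rest 0
      simp only [List.take_zero, List.count_nil] at this
      rw [show (1:Nat) = 0 + 1 from rfl, this]
      split_ifs at hz ⊢ <;> omega
    · simp only [hz, if_false, Option.map_eq_some_iff] at h
      obtain ⟨j0, hj0, rfl⟩ := h
      obtain ⟨h1, h2, h3, h4⟩ := ih _ _ hj0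
      refine ⟨by omega, by simp; omega, ?_, ?_⟩
      · rw [count_take_succ x ch rest j0]
        push_cast
        split_ifs at h3 ⊢ <;> omega
      · intro i hi1 hij
        rcases Nat.exists_eq_add_of_le hi1 with ⟨i0, rfl⟩
        rw [show 1 + i0 = i0 + 1 from by omega, count_take_succ x ch rest i0]
        rcases Nat.eq_zero_or_pos i0 with h0 | h0
        · subst h0
          simp only [List.take_zero, List.count_nil]
          split_ifs at hz ⊢ <;> push_cast <;> omega
        · have := h4 i0 h0 (by omega)
          push_cast at this ⊢
          split_ifs at this ⊢ <;> omega

-- characterisation of firstZero = none: the walk never hits zero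
theorem firstZero_none (x : Char) : ∀ (l : List Char) (d : Int),
    firstZero x d l = none →
      ∀ i : Nat, 1 ≤ i → i ≤ l.length → d + 2 * ((l.take i).count x : Int) - i ≠ 0 := by
  intro l
  induction l with
  | nil => intro d _ i hi1 hi2; simp only [List.length_nil] at hi2; omega
  | cons ch rest ih =>
    intro d h i hi1 hi2
    simp only [firstZero] at h
    by_cases hz : d + (if ch == x then 1 else -1) = 0
    · simp only [hz, if_true] at h
      exact absurd h (by simp)
    · simp only [hz, if_false, Option.map_eq_none_iff] at h
      rcases Nat.exists_eq_add_of_le hi1 with ⟨i0, rfl⟩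
      rw [show 1 + i0 = i0 + 1 from by omega, count_take_succ x ch rest i0]
      rcases Nat.eq_zero_or_pos i0 with h0 | h0
      · subst h0
        simp only [List.take_zero, List.count_nil]
        split_ifs at hz ⊢ <;> push_cast <;> omega
      · have hi2' : i0 ≤ rest.length := by
          simp only [List.length_cons] at hi2; omega
        have := ih _ h i0 h0 hi2'
        push_cast at this ⊢
        split_ifs at this ⊢ <;> omega

-- findFirst over range(a,b) returns none when p fails everywhere in [a,b)
theorem ff_none : ∀ (n : Nat) (a b : Int), (b - a).toNat ≤ n → ∀ (p : Int → Bool),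
    (∀ k, a ≤ k → k < b → p k = false) →
    findFirst p (PySem.List.pyRange a b 1) = none := by
  intro n
  induction n with
  | zero =>
    intro a b hn p _
    rw [PySem.List.pyRange_one_eq_nil (by omega)]
    rfl
  | succ n ih =>
    intro a b hn p hp
    by_cases hab : b ≤ a
    · rw [PySem.List.pyRange_one_eq_nil hab]; rfl
    · rw [PySem.List.pyRange_one_cons (by omega)]
      simp only [findFirst, hp a le_rfl (by omega), Bool.false_eq_true, if_false]
      exact ih (a + 1) b (by omega) p (fun k h1 h2 => hp k (by omega) h2)

-- findFirst over range(a,b) returns the first k in [a,b) satisfying p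
theorem ff_some : ∀ (n : Nat) (a b : Int), (b - a).toNat ≤ n → ∀ (p : Int → Bool) (k : Int),
    a ≤ k → k < b → p k = true → (∀ k', a ≤ k' → k' < k → p k' = false) →
    findFirst p (PySem.List.pyRange a b 1) = some k := by
  intro n
  induction n with
  | zero => intro a b hn p k h1 h2 _ _; omega
  | succ n ih =>
    intro a b hn p k h1 h2 hk hmin
    rw [PySem.List.pyRange_one_cons (by omega)]
    by_cases hka : k = a
    · subst hka
      simp [findFirst, hk]
    · have ha : p a = false := hmin a le_rfl (by omega)
      simp only [findFirst, ha, Bool.false_eq_true, if_false]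
      exact ih (a + 1) b (by omega) p k (by omega) h2 hk
        (fun k' hh1 hh2 => hmin k' (by omega) hh2)

-- bridge: B's scan over prefix lengths finds exactly the first zero of the walk
theorem bridge (x : Char) (rest : List Char) :
    findFirst
        (fun k => 2 * ((PySem.List.count (PySem.List.slice (x :: rest) none (some k)) x : Int)) == k)
        (PySem.List.pyRange 2 (((x :: rest).length : Int) + 1) 1)
      = (match firstZero x 0 (x :: rest) with
         | some j => some ((j : Nat) : Int)
         | none => none) := by
  cases hfz : firstZero x 0 (x :: rest) with
  | none =>
    show _ = (none : Option Int)
    apply ff_none ((((x :: rest).length : Int) + 1) - 2).toNat _ _ le_rfl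
    intro k hk1 hk2
    have hcond := firstZero_none x (x :: rest) 0 hfz k.toNat (by omega) (by omega)
    rw [PySem.List.slice_to _ (by omega), PySem.List.count_eq]
    simp only [beq_eq_false_iff_ne, ne_eq]
    omega
  | some j =>
    obtain ⟨h1, h2, h3, h4⟩ := firstZero_some x (x :: rest) 0 j hfz
    have hj2 : 2 ≤ j := by
      rcases Nat.lt_or_ge j 2 with h | h
      · interval_cases j; omega
      · exact h
    show _ = some ((j : Nat) : Int)
    apply ff_some ((((x :: rest).length : Int) + 1) - 2).toNat _ _ le_rfl
    · exact_mod_cast hj2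
    · omega
    · rw [PySem.List.slice_to _ (by omega), PySem.List.count_eq]
      simp only [Int.toNat_natCast, beq_iff_eq]
      omega
    · intro k' hk1 hk2
      have hcond := h4 k'.toNat (by omega) (by omega)
      rw [PySem.List.slice_to _ (by omega), PySem.List.count_eq]
      simp only [beq_eq_false_iff_ne, ne_eq]
      omega

-- the two segment recursions agree, by induction on the fuel
theorem altOuter_eq_bcountF : ∀ (fuel : Nat) (l : List Char), l.length ≤ fuel →
    altOuter l = bcountF fuel l := by
  intro fuel
  induction fuel with
  | zero =>
    intro l hl
    have : l = [] := List.eq_nil_of_length_eq_zero (Nat.le_zero.mp hl)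
    subst this
    simp [altOuter, bcountF]
  | succ n ih =>
    intro l hl
    cases l with
    | nil => simp [altOuter, bcountF]
    | cons x rest =>
      have hA : altOuter (x :: rest) = 1 + altOuter (altInner x 0 0 (x :: rest)) := by
        simp [altOuter]
      rw [hA, altInner_eq_firstZero x (x :: rest) 0 0,
        show (0 : Int) - 0 = 0 from by ring]
      simp only [bcountF, bridge]
      cases hfz : firstZero x 0 (x :: rest) with
      | none =>
        show 1 + altOuter []
            = 1 + bcountF n (PySem.List.slice (x :: rest) (some (((x :: rest).length : Nat) : Int)) none)
        rw [PySem.List.slice_from _ (by omega), Int.toNat_natCast, List.drop_length]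
        simp [altOuter, bcountF]
      | some j =>
        obtain ⟨h1, h2, _, _⟩ := firstZero_some x (x :: rest) 0 j hfz
        show 1 + altOuter ((x :: rest).drop j)
            = 1 + bcountF n (PySem.List.slice (x :: rest) (some ((j : Nat) : Int)) none)
        rw [PySem.List.slice_from _ (by omega), Int.toNat_natCast]
        have hlen : ((x :: rest).drop j).length ≤ n := by
          simp only [List.length_drop, List.length_cons]
          simp only [List.length_cons] at hl
          omega
        rw [ih _ hlen]

-- ===== VERDICT (by name: the statement is the Claim_ definition above) =====
theorem solution_spec : Claim_equal_solution := by
  intro s _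
  unfold Spec_solution solution solution_alt bcount
  have hA := (main_inv s.toList.length s.toList le_rfl).1 0 0 ""
  rw [hA, altOuter_eq_bcountF s.toList.length s.toList le_rfl]
  simp
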